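-- pv_equiv track=rewrite | github.com/ccfei652/docsim_v1 | luiz-tests/with_ner/doc_sim_with_ner.py | calculate_entity_similarity
-- ===== SOURCE A (Python) =====
-- def calculate_entity_similarity(user_entities, article_entities):
--     score = 0
--     for label, user_ent_list in user_entities.items():
--         if label in article_entities:
--             for user_ent, user_weight in user_ent_list:
--                 for article_ent, article_weight in article_entities[label]:
--                     if user_ent == article_ent:
--                         score += user_weight + article_weight
--     return score
-- ===== SOURCE B (Python) =====
-- def calculate_entity_similarity(user_entities, article_entities):
--     score = 0
--     for label, user_ent_list in user_entities.items():
--         article_list = article_entities.get(label)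
--         if article_list is None:
--             continue
--         agg = {}
--         for ent, weight in article_list:
--             cnt, tot = agg.get(ent, (0, 0))
--             agg[ent] = (cnt + 1, tot + weight)
--         for ent, weight in user_ent_list:
--             hit = agg.get(ent)
--             if hit is not None:
--                 score += hit[0] * weight + hit[1]
--     return score
-- ===== Notes on version B (the rewrite author's own statement) =====
-- stated objective: alternative
-- what changed: Instead of scanning the whole article-entity list for every user entity, B builds a per-label dict mapping each article entity to (match count, weight sum) once and answers each user entity with one lookup (score += count*user_weight + weight_sum).
import Mathlib
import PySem

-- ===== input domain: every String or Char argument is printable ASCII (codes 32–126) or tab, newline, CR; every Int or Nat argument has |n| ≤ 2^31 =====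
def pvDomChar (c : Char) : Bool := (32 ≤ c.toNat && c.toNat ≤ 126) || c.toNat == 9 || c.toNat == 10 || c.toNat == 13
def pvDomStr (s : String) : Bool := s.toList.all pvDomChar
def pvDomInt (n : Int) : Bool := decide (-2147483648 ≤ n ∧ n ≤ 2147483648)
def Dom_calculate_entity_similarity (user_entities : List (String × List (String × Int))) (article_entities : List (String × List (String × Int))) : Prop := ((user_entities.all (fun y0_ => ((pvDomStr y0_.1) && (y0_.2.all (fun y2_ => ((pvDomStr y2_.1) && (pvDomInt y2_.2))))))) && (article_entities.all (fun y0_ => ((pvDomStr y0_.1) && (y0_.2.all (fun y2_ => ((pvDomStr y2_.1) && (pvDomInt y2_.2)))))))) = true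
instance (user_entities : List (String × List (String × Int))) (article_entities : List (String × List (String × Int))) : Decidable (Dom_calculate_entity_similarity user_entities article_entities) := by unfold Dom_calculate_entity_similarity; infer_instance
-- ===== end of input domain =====

-- ===== PORT A =====
-- B builds a per-label (count, weight-sum) dict over the article entities instead of
-- rescanning the article list for every user entity (objective: alternative algorithm).
def calculate_entity_similarity (user_entities : List (String × List (String × Int))) (article_entities : List (String × List (String × Int))) : Int :=
  user_entities.foldl (fun score p =>
    match article_entities.lookup p.1 with
    | none => score
    | some article_list =>
        p.2.foldl (fun s q =>
          article_list.foldl (fun s2 r =>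
            if q.1 == r.1 then s2 + q.2 + r.2 else s2) s) score) 0

-- ===== PORT B =====
def pvAgg (article_list : List (String × Int)) : PySem.Dict String (Int × Int) :=
  article_list.foldl (fun d q => d.modify q.1 ((0 : Int), (0 : Int)) (fun c => (c.1 + 1, c.2 + q.2))) PySem.Dict.empty

def calculate_entity_similarity_alt (user_entities : List (String × List (String × Int))) (article_entities : List (String × List (String × Int))) : Int :=
  user_entities.foldl (fun score p =>
    match article_entities.lookup p.1 with
    | none => score
    | some article_list =>
        let agg := pvAgg article_list
        p.2.foldl (fun s q =>
          match agg.get? q.1 with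
          | some c => s + c.1 * q.2 + c.2
          | none => s) score) 0

-- ===== PRECONDITION & SPEC =====
def Spec_calculate_entity_similarity (user_entities : List (String × List (String × Int))) (article_entities : List (String × List (String × Int))) (out : Int) : Prop := out = calculate_entity_similarity_alt user_entities article_entities
instance (user_entities : List (String × List (String × Int))) (article_entities : List (String × List (String × Int))) (out : Int) : Decidable (Spec_calculate_entity_similarity user_entities article_entities out) := by unfold Spec_calculate_entity_similarity; infer_instance

-- ===== CLAIM (what is proved, stated in full; the proofs are below) =====
def Claim_equal_calculate_entity_similarity : Prop := ∀ (user_entities : List (String × List (String × Int))) (article_entities : List (String × List (String × Int))), Dom_calculate_entity_similarity user_entities article_entities → Spec_calculate_entity_similarity user_entities article_entities (calculate_entity_similarity user_entities article_entities)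

-- ===== LEMMAS AND PROOFS =====

-- A's inner scan over the article list, in closed form: count and weight-sum of the matches.
theorem afold_eq (al : List (String × Int)) (e : String) (w s : Int) :
    al.foldl (fun s2 r => if e == r.1 then s2 + w + r.2 else s2) s
      = s + ((al.filter (fun r => r.1 == e)).length : Int) * w
          + ((al.filter (fun r => r.1 == e)).map (·.2)).sum := by
  induction al generalizing s with
  | nil => simp
  | cons hd tl ih =>
    rw [List.foldl_cons, ih, List.filter_cons]
    by_cases h : hd.1 = e
    · simp only [h, beq_self_eq_true, if_true, List.length_cons, List.map_cons, List.sum_cons]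
      push_cast; ring
    · have h1 : (hd.1 == e) = false := beq_eq_false_iff_ne.2 h
      have h2 : (e == hd.1) = false := beq_eq_false_iff_ne.2 (fun hh => h hh.symm)
      simp only [h1, h2, Bool.false_eq_true, if_false]

-- The aggregation dict records exactly that (count, weight-sum) per entity.
theorem agg_getD (al : List (String × Int)) (d : PySem.Dict String (Int × Int)) (e : String) :
    (al.foldl (fun d q => d.modify q.1 ((0 : Int), (0 : Int)) (fun c => (c.1 + 1, c.2 + q.2))) d).getD e (0, 0)
      = ((d.getD e (0, 0)).1 + ((al.filter (fun r => r.1 == e)).length : Int),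
         (d.getD e (0, 0)).2 + ((al.filter (fun r => r.1 == e)).map (·.2)).sum) := by
  induction al generalizing d with
  | nil => simp
  | cons hd tl ih =>
    rw [List.foldl_cons, ih, List.filter_cons, PySem.Dict.getD_modify]
    by_cases h : hd.1 = e
    · simp only [h, beq_self_eq_true, if_true, List.length_cons, List.map_cons, List.sum_cons,
        if_pos rfl, Prod.mk.injEq]
      constructor <;> (push_cast; ring)
    · have h1 : (hd.1 == e) = false := beq_eq_false_iff_ne.2 h
      simp only [h1, Bool.false_eq_true, if_false,
        if_neg (fun hh : e = hd.1 => h hh.symm)]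

theorem agg_getD' (al : List (String × Int)) (e : String) :
    (pvAgg al).getD e (0, 0)
      = (((al.filter (fun r => r.1 == e)).length : Int),
         ((al.filter (fun r => r.1 == e)).map (·.2)).sum) := by
  simpa [pvAgg] using agg_getD al PySem.Dict.empty e

-- B's lookup step, written through getD (none contributes 0).
theorem bmatch_eq (agg : PySem.Dict String (Int × Int)) (e : String) (w s : Int) :
    (match agg.get? e with
     | some c => s + c.1 * w + c.2
     | none => s)
      = s + (agg.getD e (0, 0)).1 * w + (agg.getD e (0, 0)).2 := by
  cases h : agg.get? e with
  | none => simp [PySem.Dict.getD_eq_get?_getD, h]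
  | some c => simp [PySem.Dict.getD_eq_get?_getD, h]

theorem inner_eq (al : List (String × Int)) (ul : List (String × Int)) (s : Int) :
    ul.foldl (fun s q => al.foldl (fun s2 r => if q.1 == r.1 then s2 + q.2 + r.2 else s2) s) s
      = ul.foldl (fun s q =>
          match (pvAgg al).get? q.1 with
          | some c => s + c.1 * q.2 + c.2
          | none => s) s := by
  induction ul generalizing s with
  | nil => rfl
  | cons hd tl ih =>
    simp only [List.foldl_cons]
    rw [ih, afold_eq, bmatch_eq, agg_getD']

theorem outer_eq (ue ae : List (String × List (String × Int))) (s : Int) :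
    ue.foldl (fun score p =>
      match ae.lookup p.1 with
      | none => score
      | some article_list =>
          p.2.foldl (fun s q =>
            article_list.foldl (fun s2 r =>
              if q.1 == r.1 then s2 + q.2 + r.2 else s2) s) score) s
    = ue.foldl (fun score p =>
      match ae.lookup p.1 with
      | none => score
      | some article_list =>
          let agg := pvAgg article_list
          p.2.foldl (fun s q =>
            match agg.get? q.1 with
            | some c => s + c.1 * q.2 + c.2
            | none => s) score) s := by
  induction ue generalizing s with
  | nil => rfl
  | cons hd tl ih =>
    simp only [List.foldl_cons]
    cases h : ae.lookup hd.1 with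
    | none => simp only [h]; exact ih _
    | some al => simp only [h]; rw [inner_eq]; exact ih _

-- ===== VERDICT (by name: the statement is the Claim_ definition above) =====
theorem calculate_entity_similarity_spec : Claim_equal_calculate_entity_similarity := by
  intro ue ae _
  unfold Spec_calculate_entity_similarity calculate_entity_similarity calculate_entity_similarity_alt
  exact outer_eq ue ae 0
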